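-- pv_equiv track=rewrite | github.com/dejamiko/learning | optim/similarity_measure_eval.py | find_nn_not_self
-- ===== SOURCE A (Python) =====
-- def find_nn_not_self(array, index):
--     nns = []
--
--     best_sim = -1
--     for i in range(len(array)):
--         if index == i:
--             continue
--         if array[i] > best_sim:
--             best_sim = array[i]
--             nns = [i]
--         elif array[i] == best_sim:
--             nns.append(i)
--
--     return nns
-- ===== SOURCE B (Python) =====
-- def find_nn_not_self(array, index):
--     best = -1
--     for i, v in enumerate(array):
--         if i != index and v > best:
--             best = v
--     return [i for i, v in enumerate(array) if i != index and v == best]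
-- ===== Notes on version B (the rewrite author's own statement) =====
-- stated objective: simpler
-- what changed: Replaces A's single pass that rebuilds/resets the result list on every new maximum with two independent passes: one fold computing the maximum (seeded with -1 like A), then one comprehension selecting the matching indices.
import Mathlib
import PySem

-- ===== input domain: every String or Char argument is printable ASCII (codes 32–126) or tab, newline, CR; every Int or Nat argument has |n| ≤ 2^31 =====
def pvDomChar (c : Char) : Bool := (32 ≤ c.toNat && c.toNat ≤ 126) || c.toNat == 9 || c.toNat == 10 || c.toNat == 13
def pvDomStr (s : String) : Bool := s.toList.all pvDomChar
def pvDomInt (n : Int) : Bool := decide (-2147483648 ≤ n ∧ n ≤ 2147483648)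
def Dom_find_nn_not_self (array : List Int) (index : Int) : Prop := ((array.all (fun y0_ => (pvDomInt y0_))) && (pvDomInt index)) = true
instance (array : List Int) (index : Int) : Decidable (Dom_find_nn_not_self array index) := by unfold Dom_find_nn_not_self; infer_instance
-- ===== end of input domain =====

-- B replaces A's single pass that rebuilds the result list on each new maximum with two passes (max fold seeded with -1, then an index-selecting comprehension); objective: simpler, same cost.


-- ===== PORT A =====
def loopA : List Int → Int → Int → List Int → Int → List Int
  | [], _, _, nns, _ => nns
  | x :: xs, i, idx, nns, best =>
    if idx = i then loopA xs (i + 1) idx nns best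
    else if x > best then loopA xs (i + 1) idx [i] x
    else if x = best then loopA xs (i + 1) idx (nns ++ [i]) best
    else loopA xs (i + 1) idx nns best

-- literal port of A: range(len(array)) with array[i] becomes recursion over the
-- list carrying the running index i; state (nns, best_sim) as in A.
def find_nn_not_self (array : List Int) (index : Int) : List Int :=
  loopA array 0 index [] (-1)

-- ===== PORT B =====
def bestFold (index : Int) (l : List (Int × Int)) (b : Int) : Int :=
  l.foldl (fun b p => if p.1 != index && p.2 > b then p.2 else b) b

-- port of B: first pass computes the maximum over non-self entries (seeded -1),
-- second pass is the comprehension selecting matching indices.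
def find_nn_not_self_alt (array : List Int) (index : Int) : List Int :=
  let best := bestFold index (PySem.List.enumerate array 0) (-1)
  ((PySem.List.enumerate array 0).filter (fun p => p.1 != index && p.2 == best)).map (·.1)

-- ===== PRECONDITION & SPEC =====
def Spec_find_nn_not_self (array : List Int) (index : Int) (out : List Int) : Prop := out = find_nn_not_self_alt array index
instance (array : List Int) (index : Int) (out : List Int) : Decidable (Spec_find_nn_not_self array index out) := by unfold Spec_find_nn_not_self; infer_instance

-- ===== CLAIM (what is proved, stated in full; the proofs are below) =====
def Claim_equal_find_nn_not_self : Prop := ∀ (array : List Int) (index : Int), Dom_find_nn_not_self array index → Spec_find_nn_not_self array index (find_nn_not_self array index)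

-- ===== LEMMAS AND PROOFS =====
lemma le_bestFold (idx : Int) (l : List (Int × Int)) (b : Int) : b ≤ bestFold idx l b := by
  induction l generalizing b with
  | nil => simp [bestFold]
  | cons p l ih =>
    simp only [bestFold, List.foldl_cons] at *
    split
    · rename_i h
      simp only [Bool.and_eq_true, decide_eq_true_eq] at h
      exact le_trans (le_of_lt h.2) (ih _)
    · exact ih b

lemma loopA_eq (idx : Int) (xs : List Int) : ∀ (i : Int) (nns : List Int) (b : Int),
    loopA xs i idx nns b =
      (if bestFold idx (PySem.List.enumerate xs i) b > b then [] else nns) ++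
        ((PySem.List.enumerate xs i).filter
            (fun p => p.1 != idx && p.2 == bestFold idx (PySem.List.enumerate xs i) b)).map (·.1) := by
  induction xs with
  | nil => intro i nns b; simp [loopA, PySem.List.enumerate_nil, bestFold]
  | cons x xs ih =>
    intro i nns b
    rw [PySem.List.enumerate_cons]
    by_cases hidx : idx = i
    · have hne : (i != idx) = false := by simp [hidx]
      simp only [loopA, if_pos hidx, bestFold, List.foldl_cons, hne, List.filter_cons,
        Bool.false_and, if_neg (by simp : ¬ (false = true))]
      simpa [bestFold] using ih (i + 1) nns b
    · have hne : (i != idx) = true := by simp; exact fun h => hidx h.symm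
      have hii : ¬ i = idx := fun h => hidx h.symm
      have hB : bestFold idx ((i, x) :: PySem.List.enumerate xs (i + 1)) b =
          bestFold idx (PySem.List.enumerate xs (i + 1)) (if x > b then x else b) := by
        simp [bestFold, hii]
      by_cases hx : x > b
      · rw [loopA, if_neg (fun h => hidx h), if_pos hx, ih (i + 1) [i] x,
          hB, if_pos hx]
        simp only [List.filter_cons, hne, Bool.true_and]
        set B := bestFold idx (PySem.List.enumerate xs (i + 1)) x with hBdef
        have hxB : x ≤ B := le_bestFold _ _ _
        rw [if_pos (by omega : B > b)]
        by_cases hBx : B > x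
        · rw [if_pos hBx, if_neg (by simp only [beq_iff_eq]; omega)]
        · rw [if_neg hBx, if_pos (by simp only [beq_iff_eq]; omega)]
          simp
      · rw [hB, if_neg hx]
        by_cases hxe : x = b
        · rw [loopA, if_neg (fun h => hidx h), if_neg (by omega), if_pos hxe,
            ih (i + 1) (nns ++ [i]) b]
          simp only [List.filter_cons, hne, Bool.true_and]
          set B := bestFold idx (PySem.List.enumerate xs (i + 1)) b with hBdef
          have hbB : b ≤ B := le_bestFold _ _ _
          by_cases hBb : B > b
          · rw [if_pos hBb, if_pos hBb, if_neg (by simp only [beq_iff_eq]; omega)]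
          · rw [if_neg hBb, if_neg hBb, if_pos (by simp only [beq_iff_eq]; omega)]
            simp
        · rw [loopA, if_neg (fun h => hidx h), if_neg (by omega), if_neg hxe,
            ih (i + 1) nns b]
          simp only [List.filter_cons, hne, Bool.true_and]
          set B := bestFold idx (PySem.List.enumerate xs (i + 1)) b with hBdef
          have hbB : b ≤ B := le_bestFold _ _ _
          have hxne : (x == B) = false := by rw [beq_eq_false_iff_ne]; omega
          rw [hxne, if_neg (by simp : ¬ (false = true))]

-- ===== VERDICT (by name: the statement is the Claim_ definition above) =====
theorem find_nn_not_self_spec : Claim_equal_find_nn_not_self := by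
  intro array index _
  unfold Spec_find_nn_not_self find_nn_not_self find_nn_not_self_alt
  rw [loopA_eq]
  simp
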